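-- pv_equiv track=rewrite | github.com/KhakiSalad/jtReader | codec/bitlength.py | get_bit_field_width
-- ===== SOURCE A (Python) =====
-- def get_bit_field_width(symbol: int):
--     symbol = abs(symbol)
--     if symbol == 0:
--         return 0
--     i = 1
--     bit_field_width = 0
--     while i <= symbol and bit_field_width < 31:
--         i += i
--         bit_field_width += 1
--     return bit_field_width
-- ===== SOURCE B (Python) =====
-- def get_bit_field_width(symbol: int):
--     return min(abs(symbol).bit_length(), 31)
-- ===== Notes on version B (the rewrite author's own statement) =====
-- stated objective: idiomatic
-- what changed: Replaces the doubling loop with the closed form min(abs(symbol).bit_length(), 31).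
import Mathlib
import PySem

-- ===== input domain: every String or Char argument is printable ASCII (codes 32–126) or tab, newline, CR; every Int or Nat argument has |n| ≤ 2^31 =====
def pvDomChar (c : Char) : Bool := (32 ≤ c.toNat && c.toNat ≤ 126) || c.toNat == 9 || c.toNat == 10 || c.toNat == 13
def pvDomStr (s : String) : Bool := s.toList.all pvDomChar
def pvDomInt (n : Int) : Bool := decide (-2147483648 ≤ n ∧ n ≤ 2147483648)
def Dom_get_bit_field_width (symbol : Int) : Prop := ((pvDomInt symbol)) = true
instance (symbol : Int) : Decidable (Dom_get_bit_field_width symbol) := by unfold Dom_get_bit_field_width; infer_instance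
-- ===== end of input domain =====

-- B replaces A's doubling loop by the closed form min(bit_length(|symbol|), 31) (idiomatic).

-- ===== PORT A =====
-- the while loop of A, step for step: doubles i and counts while i ≤ symbol ∧ width < 31
def gbfwLoop (symbol i bit_field_width : Int) : Int :=
  if i ≤ symbol ∧ bit_field_width < 31 then
    gbfwLoop symbol (i + i) (bit_field_width + 1)
  else
    bit_field_width
termination_by (31 - bit_field_width).toNat
decreasing_by omega

def get_bit_field_width (symbol : Int) : Int :=
  let symbol := |symbol|
  if symbol = 0 then 0
  else gbfwLoop symbol 1 0

-- ===== PORT B =====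
-- abs(symbol).bit_length() = Nat.size of the absolute value
def get_bit_field_width_alt (symbol : Int) : Int :=
  min (Int.ofNat (Nat.size symbol.natAbs)) 31

-- ===== PRECONDITION & SPEC =====
def Spec_get_bit_field_width (symbol : Int) (out : Int) : Prop := out = get_bit_field_width_alt symbol
instance (symbol : Int) (out : Int) : Decidable (Spec_get_bit_field_width symbol out) := by unfold Spec_get_bit_field_width; infer_instance

-- ===== CLAIM (what is proved, stated in full; the proofs are below) =====
def Claim_equal_get_bit_field_width : Prop := ∀ (symbol : Int), Dom_get_bit_field_width symbol → Spec_get_bit_field_width symbol (get_bit_field_width symbol)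

-- ===== LEMMAS AND PROOFS =====

-- loop invariant: at entry i = 2^k, the loop returns min (max k n.size) 31
theorem gbfwLoop_eq (f : Nat) : ∀ (n k : Nat), k ≤ 31 → 31 - k ≤ f →
    gbfwLoop (n : Int) ((2 ^ k : Nat) : Int) (k : Int) = ((min (max k n.size) 31 : Nat) : Int) := by
  induction f with
  | zero =>
    intro n k hk hf
    have hk31 : k = 31 := by omega
    subst hk31
    rw [gbfwLoop]
    have h31 : ¬ ((((2 ^ 31 : Nat) : Int)) ≤ (n : Int) ∧ ((31 : Nat) : Int) < 31) := by
      intro h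
      have := h.2
      push_cast at this
    rw [if_neg h31]
    have : min (max 31 n.size) 31 = 31 := by omega
    rw [this]
  | succ f ih =>
    intro n k hk hf
    rw [gbfwLoop]
    by_cases hle : 2 ^ k ≤ n
    · by_cases hk31 : k < 31
      · have hcond : (((2 ^ k : Nat) : Int)) ≤ (n : Int) ∧ ((k : Nat) : Int) < 31 :=
          ⟨by exact_mod_cast hle, by exact_mod_cast hk31⟩
        rw [if_pos hcond]
        have hstep : ((2 ^ k : Nat) : Int) + ((2 ^ k : Nat) : Int) = ((2 ^ (k + 1) : Nat) : Int) := by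
          push_cast [pow_succ]; ring
        have hcast : ((k : Nat) : Int) + 1 = (((k + 1 : Nat)) : Int) := by push_cast; ring
        rw [hstep, hcast, ih n (k + 1) (by omega) (by omega)]
        have hsz : k + 1 ≤ n.size := Nat.lt_size.mpr hle
        have : max (k + 1) n.size = max k n.size := by omega
        rw [this]
      · have hk31' : k = 31 := by omega
        subst hk31'
        have hcond : ¬ ((((2 ^ 31 : Nat) : Int)) ≤ (n : Int) ∧ ((31 : Nat) : Int) < 31) := by
          intro h
          have := h.2
          push_cast at this
        rw [if_neg hcond]
        have hsz : 32 ≤ n.size := Nat.lt_size.mpr hle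
        have : min (max 31 n.size) 31 = 31 := by omega
        rw [this]
    · have hcond : ¬ ((((2 ^ k : Nat) : Int)) ≤ (n : Int) ∧ ((k : Nat) : Int) < 31) := by
        intro h
        exact hle (by exact_mod_cast h.1)
      rw [if_neg hcond]
      have hsz : n.size ≤ k := by
        by_contra h
        exact hle (Nat.lt_size.mp (by omega))
      have : min (max k n.size) 31 = k := by omega
      rw [this]

-- ===== VERDICT (by name: the statement is the Claim_ definition above) =====
theorem get_bit_field_width_spec : Claim_equal_get_bit_field_width := by
  intro symbol _
  unfold Spec_get_bit_field_width get_bit_field_width get_bit_field_width_alt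
  rw [Int.abs_eq_natAbs]
  by_cases h0 : symbol.natAbs = 0
  · rw [h0]
    simp [Nat.size]
  · rw [if_neg (by exact_mod_cast h0)]
    have h1 : (1 : Int) = ((2 ^ 0 : Nat) : Int) := by norm_num
    have h0' : (0 : Int) = ((0 : Nat) : Int) := by norm_num
    rw [h1, h0', gbfwLoop_eq 31 symbol.natAbs 0 (by omega) (by omega)]
    have : max 0 symbol.natAbs.size = symbol.natAbs.size := by omega
    rw [this]
    simp [Int.ofNat_eq_natCast, Nat.cast_min]
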